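-- pv_equiv track=rewrite | github.com/Exia01/Python | Self-Learning/Algorithm_challenges/three_odd_numbers.py | three_odd_numbers
-- ===== SOURCE A (Python) =====
-- def three_odd_numbers(nums_list, window_size=3):
--     n = window_size
--     results = []
--     temp_sum = 0
--     #test this check
--     if window_size > len(nums_list):
--         return False
--     # first sum
--     for i in range(window_size):
--         temp_sum += nums_list[i]
--
--     #can implement quick short circuit here
--     results.append(temp_sum % 2 != 0)
--
--     for i in range(window_size, len(nums_list)):
--         temp_sum = temp_sum - nums_list[i - n] + nums_list[i]
--         results.append(temp_sum % 2 != 0)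
--     return any(results)
-- ===== SOURCE B (Python) =====
-- def three_odd_numbers(nums_list, window_size=3):
--     if window_size > len(nums_list):
--         return False
--     # prefix-sum table: P[j] = sum of the first j elements
--     P = [0]
--     run = 0
--     for x in nums_list:
--         run += x
--         P.append(run)
--     for i in range(len(nums_list) - window_size + 1):
--         if (P[i + window_size] - P[i]) % 2 != 0:
--             return True
--     return False
-- ===== Notes on version B (the rewrite author's own statement) =====
-- stated objective: alternative
-- what changed: Replaces the incremental sliding running-sum that collects a list of per-window parities and any()'s it with a precomputed prefix-sum table plus a second pass over start indices that short-circuits on the first odd window difference.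
import Mathlib
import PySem

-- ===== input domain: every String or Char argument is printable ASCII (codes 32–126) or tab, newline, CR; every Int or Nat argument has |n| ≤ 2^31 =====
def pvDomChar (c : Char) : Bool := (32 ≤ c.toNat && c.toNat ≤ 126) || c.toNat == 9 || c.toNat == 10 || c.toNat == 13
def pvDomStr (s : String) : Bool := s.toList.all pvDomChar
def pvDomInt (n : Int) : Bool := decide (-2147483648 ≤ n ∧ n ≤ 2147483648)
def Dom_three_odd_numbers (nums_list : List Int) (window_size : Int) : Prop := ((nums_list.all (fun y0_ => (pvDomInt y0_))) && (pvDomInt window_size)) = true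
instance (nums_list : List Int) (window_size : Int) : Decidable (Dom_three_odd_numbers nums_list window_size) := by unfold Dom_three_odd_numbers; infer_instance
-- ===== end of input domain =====

-- B replaces A's incremental sliding running-sum (collecting all window parities, then any)
-- with a prefix-sum table and a short-circuiting scan over window starts; return value only.


-- ===== PORT A =====
def three_odd_numbers (nums_list : List Int) (window_size : Int) : Bool :=
  if window_size > (nums_list.length : Int) then false
  else
    let temp_sum : Int := (PySem.List.pyRange 0 window_size 1).foldl
      (fun s i => s + PySem.List.pyGetD nums_list i 0) 0
    let results : List Bool := [decide (PySem.Int.mod temp_sum 2 ≠ 0)]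
    let st := (PySem.List.pyRange window_size (nums_list.length : Int) 1).foldl
      (fun (st : List Bool × Int) i =>
        let t := st.2 - PySem.List.pyGetD nums_list (i - window_size) 0 + PySem.List.pyGetD nums_list i 0
        (st.1 ++ [decide (PySem.Int.mod t 2 ≠ 0)], t))
      (results, temp_sum)
    st.1.any id

-- ===== PORT B =====
def three_odd_numbers_alt (nums_list : List Int) (window_size : Int) : Bool :=
  if window_size > (nums_list.length : Int) then false
  else
    let pr := nums_list.foldl
      (fun (st : List Int × Int) x =>
        let r := st.2 + x
        (st.1 ++ [r], r)) ([0], 0)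
    (PySem.List.pyRange 0 ((nums_list.length : Int) - window_size + 1) 1).any
      (fun i => decide (PySem.Int.mod
        (PySem.List.pyGetD pr.1 (i + window_size) 0 - PySem.List.pyGetD pr.1 i 0) 2 ≠ 0))

-- ===== PRECONDITION & SPEC =====
-- Pre_ excludes exactly the negative window sizes, on which A always raises IndexError
-- (nums_list[i - n] walks past the end of the list).
def Pre_three_odd_numbers (nums_list : List Int) (window_size : Int) : Prop :=
  0 ≤ window_size
instance (nums_list : List Int) (window_size : Int) : Decidable (Pre_three_odd_numbers nums_list window_size) := by unfold Pre_three_odd_numbers; infer_instance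
def pvWitness_three_odd_numbers : List Int × Int := ([1, 2, 3, 4], 2)

def Spec_three_odd_numbers (nums_list : List Int) (window_size : Int) (out : Bool) : Prop := out = three_odd_numbers_alt nums_list window_size
instance (nums_list : List Int) (window_size : Int) (out : Bool) : Decidable (Spec_three_odd_numbers nums_list window_size out) := by unfold Spec_three_odd_numbers; infer_instance

-- ===== CLAIM (what is proved, stated in full; the proofs are below) =====
def Claim_equal_three_odd_numbers : Prop := ∀ (nums_list : List Int) (window_size : Int), Dom_three_odd_numbers nums_list window_size → Pre_three_odd_numbers nums_list window_size → Spec_three_odd_numbers nums_list window_size (three_odd_numbers nums_list window_size)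

-- ===== LEMMAS AND PROOFS =====

-- Sum of the k values nums.getD (a+0), …, nums.getD (a+k-1): the window sum both programs compare.
def winSum (nums : List Int) (a k : Nat) : Int :=
  ((List.range k).map (fun j => nums.getD (a + j) 0)).sum

lemma winSum_succ_right (nums : List Int) (a k : Nat) :
    winSum nums a (k + 1) = winSum nums a k + nums.getD (a + k) 0 := by
  simp [winSum, List.range_succ]

lemma winSum_succ_left (nums : List Int) (a k : Nat) :
    winSum nums a (k + 1) = nums.getD a 0 + winSum nums (a + 1) k := by
  simp [winSum, List.range_succ_eq_map, List.map_map, Function.comp_def, Nat.succ_eq_add_one]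
  congr 1
  apply List.map_congr_left
  intro t _
  have : a + (t + 1) = a + 1 + t := by omega
  rw [this]

lemma winSum_shift (nums : List Int) (a k : Nat) :
    winSum nums a k - nums.getD a 0 + nums.getD (a + k) 0 = winSum nums (a + 1) k := by
  have h1 := winSum_succ_right nums a k
  have h2 := winSum_succ_left nums a k
  linarith

lemma winSum_add (nums : List Int) (i k : Nat) :
    winSum nums 0 (i + k) = winSum nums 0 i + winSum nums i k := by
  simp [winSum, List.range_add, List.map_map, Function.comp_def]

lemma take_sum_eq_winSum (nums : List Int) : ∀ m : Nat, (nums.take m).sum = winSum nums 0 m := by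
  intro m
  induction m with
  | zero => simp [winSum]
  | succ m ih =>
    rw [List.take_succ, List.sum_append, ih, winSum_succ_right]
    congr 1
    cases h : nums[m]? with
    | none => simp [List.getD, h]
    | some v => simp [List.getD, h]

-- the window-parity bit both programs test
def wodd (nums : List Int) (k i : Nat) : Bool :=
  decide (PySem.Int.mod (winSum nums i k) 2 ≠ 0)

-- A's first loop computes the first window sum.
lemma loopA_first (nums : List Int) (k : Nat) (hk : k ≤ nums.length) :
    (PySem.List.pyRange 0 (k : Int) 1).foldl
      (fun s i => s + PySem.List.pyGetD nums i 0) 0 = winSum nums 0 k := by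
  rw [PySem.List.pyRange_one, List.foldl_map, PySem.List.foldl_add]
  simp [winSum]

-- A's second loop: sliding-window invariant.
lemma loopA_slide (nums : List Int) (k : Nat) :
    ∀ (c a : Nat) (res : List Bool), a + k + c = nums.length →
    ((PySem.List.pyRange ((a + k : Nat) : Int) ((nums.length : Nat) : Int) 1).foldl
      (fun (st : List Bool × Int) i =>
        (st.1 ++ [decide (PySem.Int.mod (st.2 - PySem.List.pyGetD nums (i - (k : Int)) 0 + PySem.List.pyGetD nums i 0) 2 ≠ 0)],
         st.2 - PySem.List.pyGetD nums (i - (k : Int)) 0 + PySem.List.pyGetD nums i 0))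
      (res, winSum nums a k)).1
    = res ++ (List.range c).map (fun t => wodd nums k (a + 1 + t)) := by
  intro c
  induction c with
  | zero =>
    intro a res h
    rw [PySem.List.pyRange_one_eq_nil (by omega)]
    simp
  | succ c ih =>
    intro a res h
    rw [PySem.List.pyRange_one_cons (by omega)]
    simp only [List.foldl_cons]
    have e1 : ((a + k : Nat) : Int) - (k : Int) = ((a : Nat) : Int) := by push_cast; ring
    rw [e1, PySem.List.pyGetD_natCast, PySem.List.pyGetD_natCast,
        winSum_shift nums a k]
    have e2 : ((a + k : Nat) : Int) + 1 = (((a + 1) + k : Nat) : Int) := by push_cast; ring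
    rw [e2, ih (a + 1) _ (by omega)]
    rw [List.append_assoc]
    congr 1
    rw [List.range_succ_eq_map, List.map_cons, List.map_map]
    simp only [List.singleton_append, List.cons.injEq]
    constructor
    · rfl
    · apply List.map_congr_left
      intro t _
      simp only [Function.comp_apply]
      congr 1
      omega

-- B's prefix fold builds [P0; running sums].
lemma loopB_prefix (xs : List Int) : ∀ (P0 : List Int) (p : Int),
    (xs.foldl (fun (st : List Int × Int) x => (st.1 ++ [st.2 + x], st.2 + x)) (P0, p)).1
    = P0 ++ (List.range xs.length).map (fun j => p + (xs.take (j + 1)).sum) := by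
  induction xs with
  | nil => intro P0 p; simp
  | cons x xs ih =>
    intro P0 p
    simp only [List.foldl_cons]
    rw [ih (P0 ++ [p + x]) (p + x)]
    rw [List.append_assoc]
    congr 1
    rw [List.length_cons, List.range_succ_eq_map, List.map_cons, List.map_map]
    simp only [List.singleton_append, List.cons.injEq, List.take_succ_cons]
    refine ⟨by simp, ?_⟩
    apply List.map_congr_left
    intro t _
    simp only [Function.comp_apply, Nat.succ_eq_add_one, List.take_succ_cons, List.sum_cons]
    ring

lemma prefix_getD (nums : List Int) (j : Nat) (hj : j ≤ nums.length) :
    ((0 : Int) :: (List.range nums.length).map (fun j => (nums.take (j + 1)).sum)).getD j 0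
    = winSum nums 0 j := by
  cases j with
  | zero => simp [winSum]
  | succ j =>
    simp only [List.getD_cons_succ]
    rw [PySem.List.getD_map_range _ _ _ _ (by omega)]
    rw [take_sum_eq_winSum]

-- the common characterisation both ports reduce to
lemma altB_char (nums : List Int) (k : Nat) (hk : k ≤ nums.length) :
    three_odd_numbers_alt nums (k : Int) = (List.range (nums.length - k + 1)).any (wodd nums k) := by
  unfold three_odd_numbers_alt
  rw [if_neg (by push_cast; omega)]
  simp only [loopB_prefix]
  have hr : ((nums.length : Int) - (k : Int) + 1) = ((nums.length - k + 1 : Nat) : Int) := by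
    push_cast [Nat.cast_sub hk]; ring
  rw [hr, PySem.List.pyRange_one, List.any_map]
  simp only [sub_zero, Int.toNat_natCast]
  rw [Bool.eq_iff_iff]
  simp only [List.any_eq_true, List.mem_range]
  have key : ∀ t : Nat, t < nums.length - k + 1 →
      (decide (PySem.Int.mod
        (PySem.List.pyGetD ([(0:Int)] ++ (List.range nums.length).map (fun j => 0 + (nums.take (j+1)).sum)) ((0:Int) + (t:Int) + (k:Int)) 0
         - PySem.List.pyGetD ([(0:Int)] ++ (List.range nums.length).map (fun j => 0 + (nums.take (j+1)).sum)) ((0:Int) + (t:Int)) 0) 2 ≠ 0))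
      = wodd nums k t := by
    intro t ht
    simp only [zero_add, List.singleton_append]
    have e1 : (t : Int) + (k : Int) = ((t + k : Nat) : Int) := by push_cast; ring
    rw [e1, PySem.List.pyGetD_natCast, PySem.List.pyGetD_natCast]
    rw [prefix_getD nums (t + k) (by omega), prefix_getD nums t (by omega)]
    rw [winSum_add nums t k]
    simp [wodd]
  refine exists_congr fun t => and_congr_right fun ht => ?_
  simp only [Function.comp_apply]
  rw [key t ht]

lemma portA_char (nums : List Int) (k : Nat) (hk : k ≤ nums.length) :
    three_odd_numbers nums (k : Int) = (List.range (nums.length - k + 1)).any (wodd nums k) := by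
  unfold three_odd_numbers
  rw [if_neg (by push_cast; omega)]
  dsimp only
  rw [loopA_first nums k hk]
  have h := loopA_slide nums k (nums.length - k) 0
        [decide (PySem.Int.mod (winSum nums 0 k) 2 ≠ 0)] (by omega)
  simp only [Nat.zero_add] at h
  rw [h]
  have hw : (decide (PySem.Int.mod (winSum nums 0 k) 2 ≠ 0)) = wodd nums k 0 := rfl
  rw [hw]
  rw [show nums.length - k + 1 = 1 + (nums.length - k) from by omega, List.range_add]
  simp [List.any_append, List.any_map, Function.comp_def]

-- ===== VERDICT (by name: the statement is the Claim_ definition above) =====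
theorem three_odd_numbers_spec : Claim_equal_three_odd_numbers := by
  intro nums ws _ hpre
  unfold Spec_three_odd_numbers
  by_cases hgt : ws > (nums.length : Int)
  · unfold three_odd_numbers three_odd_numbers_alt
    rw [if_pos hgt, if_pos hgt]
  · push_neg at hgt
    have hws : ws = ((ws.toNat : Nat) : Int) := by
      have : (0 : Int) ≤ ws := hpre
      omega
    have hk : ws.toNat ≤ nums.length := by omega
    rw [hws, portA_char nums ws.toNat hk, altB_char nums ws.toNat hk]
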